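-- pv_equiv track=rewrite | github.com/pypi-data/pypi-mirror-314 | packages/ictasks/ictasks-0.1.2-py3-none-any.whl/ictasks/scheduler/schedulers/slurm.py | _parse_nodelist
-- ===== SOURCE A (Python) =====
-- def _parse_brackets(content: str) -> list[str]:
--     first_idx = content.index("[")
--     last_idx = content.index("]")
--
--     prefix = content[:first_idx]
--     bracket_internals = content[first_idx + 1 : last_idx]
--
--     entries = []
--     bracket_entries = bracket_internals.split(",")
--     for bracket_entry in bracket_entries:
--         if "-" in bracket_entry:
--             start, end = bracket_entry.split("-")
--             for idx in range(int(start), int(end) + 1):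
--                 entries.append(prefix + str(idx))
--         else:
--             entries.append(prefix + bracket_entry)
--     return entries
--
-- def _parse_nodelist(nodelist: str) -> list[str]:
--
--     entries = []
--     in_brackets = False
--     working = ""
--     for c in nodelist:
--         if c == "[":
--             in_brackets = True
--             working += c
--         elif c == "]":
--             in_brackets = False
--             working += c
--         elif c == "," and not in_brackets:
--             entries.append(working)
--             working = ""
--         else:
--             working += c
--     if working:
--         entries.append(working)
--
--     nodes = []
--     for entry in entries:
--         if "[" in entry and "]" in entry:
--             nodes.extend(_parse_brackets(entry))
--         else:
--             nodes.append(entry)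
--     return nodes
-- ===== SOURCE B (Python) =====
-- def _parse_brackets(content: str) -> list[str]:
--     first_idx = content.index("[")
--     last_idx = content.index("]")
--
--     prefix = content[:first_idx]
--     bracket_internals = content[first_idx + 1 : last_idx]
--
--     entries = []
--     bracket_entries = bracket_internals.split(",")
--     for bracket_entry in bracket_entries:
--         if "-" in bracket_entry:
--             start, end = bracket_entry.split("-")
--             for idx in range(int(start), int(end) + 1):
--                 entries.append(prefix + str(idx))
--         else:
--             entries.append(prefix + bracket_entry)
--     return entries
--
--
-- def _parse_nodelist(nodelist: str) -> list[str]: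
--     # Split on every comma first, then coalesce parts that belong to an open bracket group.
--     parts = nodelist.split(",")
--     entries = []
--     buf = None
--     for part in parts[:-1]:
--         buf = part if buf is None else buf + "," + part
--         if buf.rfind("[") <= buf.rfind("]"):
--             entries.append(buf)
--             buf = None
--     tail = parts[-1] if buf is None else buf + "," + parts[-1]
--     if tail:
--         entries.append(tail)
--     return [
--         node
--         for entry in entries
--         for node in (_parse_brackets(entry) if "[" in entry and "]" in entry else [entry])
--     ]
-- ===== Notes on version B (the rewrite author's own statement) =====
-- stated objective: faster
-- what changed: The per-character Python scanner loop with an in_brackets flag is replaced by one str.split(',') followed by a coalescing pass over the parts (a buffer is flushed when its last bracket, found via rfind, is not an unclosed '['), and the expansion loop becomes a flat comprehension; _parse_brackets is kept verbatim.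
import Mathlib
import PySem

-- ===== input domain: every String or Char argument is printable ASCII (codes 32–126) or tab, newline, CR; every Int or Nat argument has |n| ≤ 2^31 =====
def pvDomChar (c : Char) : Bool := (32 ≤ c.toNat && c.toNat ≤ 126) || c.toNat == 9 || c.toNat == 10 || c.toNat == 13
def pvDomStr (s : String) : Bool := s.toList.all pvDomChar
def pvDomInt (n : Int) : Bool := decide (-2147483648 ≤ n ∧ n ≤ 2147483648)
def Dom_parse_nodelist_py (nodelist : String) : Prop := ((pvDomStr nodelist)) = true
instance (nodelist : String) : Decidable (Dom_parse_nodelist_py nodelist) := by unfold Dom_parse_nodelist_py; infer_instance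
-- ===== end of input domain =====

-- B replaces A's per-character scanner by one split-on-comma plus a pass coalescing the parts
-- of an open bracket group (measurably faster in Python by a constant factor: the char loop
-- moves into C-level str.split/rfind); _parse_brackets is kept verbatim.

-- ===== PORT A =====
-- shared helper: literal port of _parse_brackets (identical in Source A and Source B), over List Char.
-- `start, end = bracket_entry.split("-")` raises unless the split has exactly 2 parts, and
-- int(...) raises on non-numeric parts: Pre_ excludes those inputs; the getD defaults are
-- only reached outside Pre_.
def pbChars (content : List Char) : List (List Char) :=
  let first_idx := PySem.Chars.find content ['[']   -- content.index("["): '[' present at every call site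
  let last_idx := PySem.Chars.find content [']']
  let pre := PySem.Chars.slice content none (some first_idx)
  let internals := PySem.Chars.slice content (some (first_idx + 1)) (some last_idx)
  (PySem.Chars.splitOn internals [',']).foldl (fun acc be =>
    if PySem.Chars.isIn ['-'] be then
      let parts := PySem.Chars.splitOn be ['-']
      let s := parts.getD 0 []
      let t := parts.getD 1 []
      acc ++ (PySem.List.pyRange ((PySem.Int.ofChars? s).getD 0)
               ((PySem.Int.ofChars? t).getD 0 + 1) 1).map (fun i => pre ++ PySem.Int.toChars i)
    else acc ++ [pre ++ be]) []

def parse_nodelist_py (nodelist : String) : List String :=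
  let st := nodelist.toList.foldl
    (fun (st : List (List Char) × Bool × List Char) c =>
      let (entries, in_brackets, working) := st
      if c = '[' then (entries, true, working ++ [c])
      else if c = ']' then (entries, false, working ++ [c])
      else if c = ',' ∧ in_brackets = false then (entries ++ [working], in_brackets, [])
      else (entries, in_brackets, working ++ [c]))
    ([], false, [])
  let entries := if st.2.2 ≠ [] then st.1 ++ [st.2.2] else st.1
  (entries.foldl (fun acc e =>
      if PySem.Chars.isIn ['['] e && PySem.Chars.isIn [']'] e then acc ++ pbChars e
      else acc ++ [e]) []).map String.ofList

-- ===== PORT B =====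
def parse_nodelist_py_alt (nodelist : String) : List String :=
  let parts := PySem.Chars.splitOn nodelist.toList [',']
  let st := (PySem.List.slice parts none (some (-1))).foldl
    (fun (st : List (List Char) × Option (List Char)) part =>
      let (entries, buf) := st
      let b := match buf with | none => part | some w => w ++ [','] ++ part
      if PySem.Chars.rfind b ['['] ≤ PySem.Chars.rfind b [']'] then (entries ++ [b], none)
      else (entries, some b))
    ([], none)
  let lastp := PySem.List.pyGetD parts (-1) []
  let tail := match st.2 with | none => lastp | some w => w ++ [','] ++ lastp
  let entries := if tail ≠ [] then st.1 ++ [tail] else st.1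
  (entries.flatMap (fun e =>
      if PySem.Chars.isIn ['['] e && PySem.Chars.isIn [']'] e then pbChars e else [e])).map String.ofList

-- ===== PRECONDITION & SPEC =====
-- reference decomposition of the nodelist into comma-separated bracket-aware entries,
-- used only to state Pre_ (proved below to coincide with what both ports compute)
def splitC : List Char → List Char × List (List Char)
  | [] => ([], [])
  | c :: rest =>
    let (p, ps) := splitC rest
    if c = ',' then ([], p :: ps) else (c :: p, ps)

def openW (w : List Char) : Bool :=
  w.foldl (fun st c => if c = '[' then true else if c = ']' then false else st) false

def refP (w : List Char) (p : List Char) : List (List Char) → List (List Char)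
  | [] => if w ++ p = [] then [] else [w ++ p]
  | q :: ps => if openW (w ++ p) then refP (w ++ p ++ [',']) q ps else (w ++ p) :: refP [] q ps

def preEntries (cs : List Char) : List (List Char) :=
  refP [] (splitC cs).1 (splitC cs).2

-- Pre_ excludes exactly the inputs on which Python's _parse_brackets raises a ValueError:
-- some entry containing '[' and ']' whose bracket internals have a '-' token that does not
-- split into exactly two int()-parseable parts.
def Pre_parse_nodelist_py (nodelist : String) : Prop :=
  ∀ e ∈ preEntries nodelist.toList,
    (PySem.Chars.isIn ['['] e && PySem.Chars.isIn [']'] e) = true →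
      ∀ be ∈ PySem.Chars.splitOn
          (PySem.Chars.slice e (some (PySem.Chars.find e ['['] + 1)) (some (PySem.Chars.find e [']']))) [','],
        PySem.Chars.isIn ['-'] be = true →
          (PySem.Chars.splitOn be ['-']).length = 2 ∧
          ∀ p ∈ PySem.Chars.splitOn be ['-'], (PySem.Int.ofChars? p).isSome = true
instance (nodelist : String) : Decidable (Pre_parse_nodelist_py nodelist) := by
  unfold Pre_parse_nodelist_py; infer_instance

def pvWitness_parse_nodelist_py : String := "n[1-2],x"

def Spec_parse_nodelist_py (nodelist : String) (out : List String) : Prop := out = parse_nodelist_py_alt nodelist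
instance (nodelist : String) (out : List String) : Decidable (Spec_parse_nodelist_py nodelist out) := by unfold Spec_parse_nodelist_py; infer_instance

-- ===== CLAIM (what is proved, stated in full; the proofs are below) =====
def Claim_equal_parse_nodelist_py : Prop := ∀ (nodelist : String), Dom_parse_nodelist_py nodelist → Pre_parse_nodelist_py nodelist → Spec_parse_nodelist_py nodelist (parse_nodelist_py nodelist)

-- ===== LEMMAS AND PROOFS =====

-- proof-side names for the two loop bodies and the entry expansion
def stepA (st : List (List Char) × Bool × List Char) (c : Char) : List (List Char) × Bool × List Char :=
  if c = '[' then (st.1, true, st.2.2 ++ [c])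
  else if c = ']' then (st.1, false, st.2.2 ++ [c])
  else if c = ',' ∧ st.2.1 = false then (st.1 ++ [st.2.2], st.2.1, [])
  else (st.1, st.2.1, st.2.2 ++ [c])

def finishA (st : List (List Char) × Bool × List Char) : List (List Char) :=
  if st.2.2 ≠ [] then st.1 ++ [st.2.2] else st.1

def stepB (st : List (List Char) × Option (List Char)) (part : List Char) :
    List (List Char) × Option (List Char) :=
  let b := match st.2 with | none => part | some w => w ++ [','] ++ part
  if PySem.Chars.rfind b ['['] ≤ PySem.Chars.rfind b [']'] then (st.1 ++ [b], none)
  else (st.1, some b)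

def expandF (e : List Char) : List (List Char) :=
  if PySem.Chars.isIn ['['] e && PySem.Chars.isIn [']'] e then pbChars e else [e]

def wOf : Option (List Char) → List Char
  | none => []
  | some w => w ++ [',']

-- char-level reference splitter: flush the working buffer at a comma seen outside brackets
def refC (w : List Char) : List Char → List (List Char)
  | [] => if w = [] then [] else [w]
  | c :: cs => if c = ',' ∧ openW w = false then w :: refC [] cs else refC (w ++ [c]) cs

-- part-level reference splitter (over the comma-split parts, last part handled separately)
def refPL (w : List Char) : List (List Char) → List Char → List (List Char)
  | [], last => if w ++ last = [] then [] else [w ++ last]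
  | q :: qs, last => if openW (w ++ q) then refPL (w ++ q ++ [',']) qs last else (w ++ q) :: refPL [] qs last

theorem openW_append (w : List Char) (c : Char) :
    openW (w ++ [c]) = if c = '[' then true else if c = ']' then false else openW w := by
  simp [openW, List.foldl_append]

theorem splitOn_go_comma (fuel : Nat) : ∀ (l cur : List Char) (accs : List (List Char)),
    l.length < fuel →
    PySem.Chars.splitOn.go [','] fuel l cur accs =
      accs.reverse ++ (cur.reverse ++ (splitC l).1) :: (splitC l).2 := by
  induction fuel with
  | zero => intro l cur accs h; omega
  | succ f ih =>
    intro l cur accs h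
    cases l with
    | nil => simp [PySem.Chars.splitOn.go, splitC]
    | cons c rest =>
      by_cases hc : c = ','
      · subst hc
        rw [PySem.Chars.splitOn.go]
        simp only [List.isPrefixOf, BEq.rfl, Bool.true_and, if_pos]
        rw [show List.drop [','].length (',' :: rest) = rest from rfl]
        rw [ih rest [] (cur.reverse :: accs) (by simp at h ⊢; omega)]
        simp [splitC]
      · rw [PySem.Chars.splitOn.go]
        rw [show List.isPrefixOf [','] (c :: rest) = false from by
          simp [List.isPrefixOf]; exact fun hh => (hc hh.symm).elim]
        simp only [Bool.false_eq_true, if_false]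
        rw [ih rest (c :: cur) accs (by simp at h ⊢; omega)]
        simp [splitC, hc]

theorem splitOn_comma (cs : List Char) :
    PySem.Chars.splitOn cs [','] = (splitC cs).1 :: (splitC cs).2 := by
  simp [PySem.Chars.splitOn, splitOn_go_comma cs.length.succ cs [] [] (by omega)]

theorem rfind_go_append (b : List Char) (c d : Char) : ∀ (i : Nat), i < b.length →
    PySem.Chars.rfind.go (b ++ [c]) [d] i = PySem.Chars.rfind.go b [d] i := by
  intro i
  induction i with
  | zero =>
    intro h
    rw [PySem.Chars.rfind.go, PySem.Chars.rfind.go]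
    cases b with
    | nil => simp at h
    | cons x xs => simp [List.isPrefixOf]
  | succ j ih =>
    intro h
    rw [PySem.Chars.rfind.go, PySem.Chars.rfind.go]
    have hdrop : List.drop (j+1) (b ++ [c]) = List.drop (j+1) b ++ [c] := by
      rw [List.drop_append_of_le_length (by omega)]
    have hne : List.drop (j+1) b ≠ [] := by
      simp [List.drop_eq_nil_iff]; omega
    rw [hdrop]
    obtain ⟨x, xs, hx⟩ := List.exists_cons_of_ne_nil hne
    rw [hx]
    simp only [List.cons_append, List.isPrefixOf]
    rw [ih (by omega)]
    rfl

theorem rfind_snoc (b : List Char) (c d : Char) :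
    PySem.Chars.rfind (b ++ [c]) [d] = if c = d then (b.length : Int) else PySem.Chars.rfind b [d] := by
  rw [PySem.Chars.rfind, PySem.Chars.rfind]
  have hlen : (b ++ [c]).length = b.length + 1 := by simp
  rw [hlen]
  rw [PySem.Chars.rfind.go]
  have h1 : List.drop (b.length + 1) (b ++ [c]) = [] := by simp
  rw [h1]
  simp only [List.isPrefixOf, Bool.false_eq_true, if_false]
  cases hb : b with
  | nil =>
    subst hb
    simp only [List.nil_append, List.length_nil]
    rw [PySem.Chars.rfind.go, PySem.Chars.rfind.go]
    simp only [List.isPrefixOf, Bool.and_true]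
    by_cases hcd : c = d
    · simp [hcd]
    · rw [show (d == c) = false from by simp; exact fun hh => (hcd hh.symm).elim]
      simp [hcd]
  | cons x xs =>
    rw [← hb]
    have hblen : b.length = xs.length + 1 := by rw [hb]; simp
    rw [hblen]
    rw [PySem.Chars.rfind.go]
    have h2 : List.drop (xs.length + 1) (b ++ [c]) = [c] := by
      rw [List.drop_append_of_le_length (by omega), List.drop_eq_nil_iff.mpr (by omega)]; rfl
    rw [h2]
    simp only [List.isPrefixOf, Bool.and_true]
    by_cases hcd : c = d
    · simp [hcd]
    · rw [show (d == c) = false from by simp; exact fun hh => (hcd hh.symm).elim]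
      simp only [Bool.false_eq_true, if_false, hcd]
      rw [rfind_go_append b c d xs.length (by omega)]
      conv_rhs => rw [PySem.Chars.rfind.go]
      have h3 : List.drop (xs.length + 1) b = [] := by rw [hb]; simp
      rw [h3]
      simp [List.isPrefixOf]

theorem rfind_go_lt (b : List Char) (d : Char) : ∀ i : Nat, PySem.Chars.rfind.go b [d] i ≤ i := by
  intro i
  induction i with
  | zero => rw [PySem.Chars.rfind.go]; split <;> simp
  | succ j ih => rw [PySem.Chars.rfind.go]; split; · simp
                 · exact le_trans ih (by exact_mod_cast Nat.le_succ j)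

theorem rfind_nil (d : Char) : PySem.Chars.rfind [] [d] = -1 := by
  rw [PySem.Chars.rfind]
  simp only [List.length_nil]
  rw [PySem.Chars.rfind.go]
  simp [List.isPrefixOf]

theorem rfind_lt_length (b : List Char) (d : Char) : PySem.Chars.rfind b [d] < b.length := by
  cases b with
  | nil => simp [rfind_nil]
  | cons x xs =>
    rw [PySem.Chars.rfind]
    have h : (x :: xs).length = xs.length + 1 := by simp
    rw [h]
    rw [PySem.Chars.rfind.go]
    have h2 : List.drop (xs.length + 1) (x :: xs) = [] := by simp
    rw [h2]
    simp only [List.isPrefixOf, Bool.false_eq_true, if_false]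
    have := rfind_go_lt (x :: xs) d xs.length
    push_cast
    omega

theorem rfind_test_eq (b : List Char) :
    (decide (PySem.Chars.rfind b ['['] ≤ PySem.Chars.rfind b [']'])) = !openW b := by
  induction b using List.reverseRecOn with
  | nil => simp [rfind_nil, openW]
  | append_singleton b c ih =>
    rw [rfind_snoc, rfind_snoc, openW_append]
    by_cases h1 : c = '['
    · subst h1
      have := rfind_lt_length b ']'
      simp only [if_neg (show ¬('[' = ']') by decide)]
      have hh : ¬ ((b.length : Int) ≤ PySem.Chars.rfind b [']']) := by omega
      simp [hh]
    · by_cases h2 : c = ']'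
      · subst h2
        have := rfind_lt_length b '['
        simp only [if_neg (show ¬(']' = '[') by decide)]
        have hh : PySem.Chars.rfind b ['['] ≤ (b.length : Int) := by omega
        simp [hh]
      · rw [if_neg h1, if_neg h2, if_neg h1, if_neg h2]
        exact ih

theorem rfind_test_iff (b : List Char) :
    (PySem.Chars.rfind b ['['] ≤ PySem.Chars.rfind b [']']) ↔ openW b = false := by
  have h := rfind_test_eq b
  cases hob : openW b <;> rw [hob] at h <;> simp at h <;> simp [h]

theorem scanA_eq_refC (cs : List Char) : ∀ (es : List (List Char)) (inb : Bool) (w : List Char),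
    inb = openW w →
    finishA (cs.foldl stepA (es, inb, w)) = es ++ refC w cs := by
  induction cs with
  | nil =>
    intro es inb w h
    simp only [List.foldl_nil, refC, finishA]
    by_cases hw : w = [] <;> simp [hw]
  | cons c cs ih =>
    intro es inb w h
    simp only [List.foldl_cons]
    by_cases h1 : c = '['
    · subst h1
      rw [show stepA (es, inb, w) '[' = (es, true, w ++ ['[']) from by simp [stepA]]
      rw [ih es true (w ++ ['[']) (by rw [openW_append]; simp)]
      simp [refC]
    · by_cases h2 : c = ']'
      · subst h2
        rw [show stepA (es, inb, w) ']' = (es, false, w ++ [']']) from by simp [stepA]]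
        rw [ih es false (w ++ [']']) (by rw [openW_append]; simp)]
        simp [refC]
      · by_cases hc : c = ','
        · subst hc
          cases hb : inb with
          | false =>
            rw [show stepA (es, false, w) ',' = (es ++ [w], false, []) from by simp [stepA]]
            rw [ih (es ++ [w]) false [] rfl]
            rw [refC, if_pos ⟨rfl, by rw [← h, hb]⟩]
            simp
          | true =>
            rw [show stepA (es, true, w) ',' = (es, true, w ++ [',']) from by simp [stepA]]
            rw [ih es true (w ++ [',']) (by rw [openW_append]; simp [← h, hb])]
            rw [refC, if_neg (by rw [← h, hb]; simp)]
        · rw [show stepA (es, inb, w) c = (es, inb, w ++ [c]) from by simp [stepA, h1, h2, hc]]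
          rw [ih es inb (w ++ [c]) (by rw [openW_append]; simp [h1, h2, h])]
          rw [refC, if_neg (by simp [hc])]

theorem refP_shift (ps : List (List Char)) (w p w' p' : List Char) (h : w ++ p = w' ++ p') :
    refP w p ps = refP w' p' ps := by
  cases ps <;> simp [refP, h]

theorem refC_eq_refP (cs : List Char) : ∀ (w : List Char),
    refC w cs = refP w (splitC cs).1 (splitC cs).2 := by
  induction cs with
  | nil => intro w; simp [refC, splitC, refP]
  | cons c cs ih =>
    intro w
    by_cases hc : c = ','
    · subst hc
      rw [refC]
      rw [show splitC (',' :: cs) = ([], (splitC cs).1 :: (splitC cs).2) from by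
        simp [splitC]]
      rw [refP]
      simp only [List.append_nil]
      by_cases ho : openW w = false
      · rw [if_pos (by simp [ho]), if_neg (by simp [ho])]
        rw [ih []]
      · rw [if_neg (by simp [ho]), if_pos (by simpa using ho)]
        rw [ih (w ++ [','])]
    · rw [refC, if_neg (by simp [hc])]
      rw [show splitC (c :: cs) = (c :: (splitC cs).1, (splitC cs).2) from by
        simp [splitC, hc]]
      rw [ih (w ++ [c])]
      exact refP_shift _ _ _ _ _ (by simp)

theorem refP_eq_refPL (ps : List (List Char)) : ∀ (p w : List Char),
    refP w p ps = refPL w ((p :: ps).dropLast) ((p :: ps).getLast (by simp)) := by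
  induction ps with
  | nil => intro p w; simp [refP, refPL, List.dropLast]
  | cons q ps ih =>
    intro p w
    have hdl : (p :: q :: ps).dropLast = p :: (q :: ps).dropLast := by simp
    have hgl : (p :: q :: ps).getLast (by simp) = (q :: ps).getLast (by simp) := by
      simp [List.getLast_cons]
    rw [hdl, hgl, refP, refPL, ih q (w ++ p ++ [',']), ih q []]

theorem mergeB_gen (qs : List (List Char)) : ∀ (last : List Char) (buf : Option (List Char)) (es : List (List Char)),
    (let st := qs.foldl stepB (es, buf)
     let tail := (match st.2 with | none => last | some w => w ++ [','] ++ last)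
     if tail ≠ [] then st.1 ++ [tail] else st.1) =
    es ++ refPL (wOf buf) qs last := by
  induction qs with
  | nil =>
    intro last buf es
    simp only [List.foldl_nil, refPL]
    cases buf with
    | none =>
      simp only [wOf, List.nil_append]
      by_cases hp : last = [] <;> simp [hp]
    | some w =>
      simp only [wOf]
      simp
  | cons q qs ih =>
    intro last buf es
    simp only [List.foldl_cons]
    rw [refPL]
    by_cases ho : openW (wOf buf ++ q) = false
    · rw [show stepB (es, buf) q = (es ++ [wOf buf ++ q], none) from by
        cases buf with
        | none =>
          have hq : openW q = false := by simpa [wOf] using ho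
          simp [stepB, wOf, if_pos ((rfind_test_iff q).mpr hq)]
        | some w =>
          have hq := (rfind_test_iff (w ++ [','] ++ q)).mpr (by simpa [wOf] using ho)
          simp only [stepB, wOf]
          rw [if_pos (by simpa using hq)]]
      rw [ih last none (es ++ [wOf buf ++ q])]
      rw [if_neg (by simp [ho])]
      simp [wOf]
    · have ho' : openW (wOf buf ++ q) = true := by simpa using ho
      rw [show stepB (es, buf) q = (es, some (wOf buf ++ q)) from by
        cases buf with
        | none =>
          have hq : ¬ (PySem.Chars.rfind q ['['] ≤ PySem.Chars.rfind q [']']) := by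
            rw [rfind_test_iff]; simpa [wOf] using ho'
          simp [stepB, wOf, if_neg hq]
        | some w =>
          have hq : ¬ (PySem.Chars.rfind (w ++ [','] ++ q) ['['] ≤ PySem.Chars.rfind (w ++ [','] ++ q) [']']) := by
            rw [rfind_test_iff]; simpa [wOf] using ho'
          simp only [stepB, wOf]
          rw [if_neg (by simpa using hq)]]
      rw [ih last (some (wOf buf ++ q)) es]
      rw [if_pos ho']
      simp [wOf]

theorem expand_foldl (l : List (List Char)) :
    l.foldl (fun acc e =>
      if PySem.Chars.isIn ['['] e && PySem.Chars.isIn [']'] e then acc ++ pbChars e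
      else acc ++ [e]) [] = l.flatMap expandF := by
  have h : (fun (acc : List (List Char)) e =>
      if PySem.Chars.isIn ['['] e && PySem.Chars.isIn [']'] e then acc ++ pbChars e
      else acc ++ [e]) = fun acc e => acc ++ expandF e := by
    funext acc e; rw [expandF]; split <;> rfl
  rw [h, PySem.List.foldl_append_eq_flatMap]
  rfl

theorem ports_eq (s : String) : parse_nodelist_py s = parse_nodelist_py_alt s := by
  have hA : parse_nodelist_py s =
      ((finishA (s.toList.foldl stepA ([], false, []))).foldl (fun acc e =>
        if PySem.Chars.isIn ['['] e && PySem.Chars.isIn [']'] e then acc ++ pbChars e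
        else acc ++ [e]) []).map String.ofList := rfl
  rw [hA, scanA_eq_refC s.toList [] false [] rfl, List.nil_append, expand_foldl]
  have hB : parse_nodelist_py_alt s =
      (let parts := PySem.Chars.splitOn s.toList [',']
       let st := (PySem.List.slice parts none (some (-1))).foldl stepB ([], none)
       let lastp := PySem.List.pyGetD parts (-1) []
       let tail := match st.2 with | none => lastp | some w => w ++ [','] ++ lastp
       let entries := if tail ≠ [] then st.1 ++ [tail] else st.1
       (entries.flatMap expandF).map String.ofList) := rfl
  rw [hB]
  simp only [splitOn_comma s.toList, PySem.List.slice_to_neg_one]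
  rw [PySem.List.pyGetD_neg_one _ _ (List.cons_ne_nil _ _)]
  rw [mergeB_gen (((splitC s.toList).1 :: (splitC s.toList).2).dropLast)
        (((splitC s.toList).1 :: (splitC s.toList).2).getLast (List.cons_ne_nil _ _)) none []]
  rw [List.nil_append]
  rw [refC_eq_refP s.toList [], refP_eq_refPL]
  rfl

-- ===== VERDICT (by name: the statement is the Claim_ definition above) =====
theorem parse_nodelist_py_spec : Claim_equal_parse_nodelist_py := by
  intro nodelist _ _
  unfold Spec_parse_nodelist_py
  exact ports_eq nodelist
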